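-- pv_equiv track=rewrite | github.com/Wozniak456/Optimization_by_binary_relation | NM.py | s_search
-- ===== SOURCE A (Python) =====
-- def s_search(u_section, dim):
--     s0 = {key for key, value in u_section.items() if not value}
--     elements = 0
--     step = 0
--     s = {0: s0}
--     s_unique = {0: s0}
--     elements += len(s0)
--
--     while elements < dim:
--         s_i = set()
--         for key, value in u_section.items():
--             is_subset = set(value).issubset(s[step])
--             if is_subset:
--                 s_i.add(key)
--         step += 1
--         s[step] = s_i
--         s_unique[step] = s[step] - s[step-1]
--         s_i = s[step]-s[step-1]
--         elements += len(s_i)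
--     return s_unique
-- ===== SOURCE B (Python) =====
-- def s_search(u_section, dim):
--     # Worklist layering: keep one cumulative 'placed' set and a shrinking list of
--     # still-unplaced items; each level scans only the unplaced items instead of
--     # re-scanning the whole dict and taking set differences.
--     current = {k for k, v in u_section.items() if not v}
--     placed = set(current)
--     remaining = [(k, v) for k, v in u_section.items() if k not in placed]
--     result = {0: current}
--     level = 0
--     elements = len(current)
--     while elements < dim:
--         level += 1
--         current = {k for k, v in remaining if set(v) <= placed}
--         result[level] = current
--         placed |= current
--         elements += len(current)
--         remaining = [(k, v) for k, v in remaining if k not in placed]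
--     return result
-- ===== Notes on version B (the rewrite author's own statement) =====
-- stated objective: alternative
-- what changed: B keeps one cumulative 'placed' set and a shrinking worklist of still-unplaced items and scans only those per level, instead of A's re-scan of the whole dict every level plus a dict of cumulative sets and per-level set differences.
import Mathlib
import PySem

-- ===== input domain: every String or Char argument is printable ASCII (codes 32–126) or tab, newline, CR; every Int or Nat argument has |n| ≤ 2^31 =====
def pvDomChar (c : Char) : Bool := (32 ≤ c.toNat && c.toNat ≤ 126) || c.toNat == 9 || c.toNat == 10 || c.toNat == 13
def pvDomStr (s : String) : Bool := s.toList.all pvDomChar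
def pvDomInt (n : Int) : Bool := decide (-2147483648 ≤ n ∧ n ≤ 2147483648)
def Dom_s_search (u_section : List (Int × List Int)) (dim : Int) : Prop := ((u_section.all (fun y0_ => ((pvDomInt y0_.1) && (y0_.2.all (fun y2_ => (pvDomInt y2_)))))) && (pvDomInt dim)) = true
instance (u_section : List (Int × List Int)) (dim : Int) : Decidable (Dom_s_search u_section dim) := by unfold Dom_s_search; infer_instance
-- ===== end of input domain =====

-- B replaces A's per-level rescan of the whole dict (and the set differences s[step]-s[step-1])
-- by one cumulative 'placed' set and a shrinking worklist of unplaced items; return values are equal.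

-- ===== PORT A =====
-- While-loop of A, with fuel u_section.length + 1: whenever the Python loop terminates it adds
-- at least one new key per iteration, so it runs at most u_section.length times and the fuel is
-- never exhausted; where the Python loop would run forever the fuel runs out (port B uses the
-- same fuel, and the two ports are proved equal for every input).
def sSearchLoopA (items : List (Int × List Int)) (fuel : Nat)
    (s su : PySem.Dict Int (List Int)) (step elements dim : Int) : PySem.Dict Int (List Int) :=
  match fuel with
  | 0 => su
  | Nat.succ fuel =>
    if elements < dim then
      let s_i : PySem.Set Int := items.foldl
        (fun acc kv => if PySem.Set.issubset (PySem.Set.ofList kv.2) (s.getD step []) then PySem.Set.add acc kv.1 else acc)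
        PySem.Set.empty
      let step' := step + 1
      let s' := s.insert step' s_i
      let diff := PySem.Set.diff (s'.getD step' []) (s'.getD (step' - 1) [])
      sSearchLoopA items fuel s' (su.insert step' diff) step' (elements + PySem.Set.len diff) dim
    else su

def s_search (u_section : List (Int × List Int)) (dim : Int) : List (Int × List Int) :=
  let s0 : PySem.Set Int := u_section.foldl
    (fun acc kv => if kv.2.isEmpty then PySem.Set.add acc kv.1 else acc) PySem.Set.empty
  (sSearchLoopA u_section (u_section.length + 1)
    (PySem.Dict.ofList [((0 : Int), s0)]) (PySem.Dict.ofList [((0 : Int), s0)])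
    0 (PySem.Set.len s0) dim).items

-- ===== PORT B =====
def sSearchLoopB (fuel : Nat) (placed : PySem.Set Int)
    (remaining result : List (Int × List Int)) (level elements dim : Int) : List (Int × List Int) :=
  match fuel with
  | 0 => result
  | Nat.succ fuel =>
    if elements < dim then
      let level' := level + 1
      let current : PySem.Set Int := PySem.Set.ofList
        ((remaining.filter (fun kv => PySem.Set.issubset (PySem.Set.ofList kv.2) placed)).map (·.1))
      let placed' := PySem.Set.update placed current
      let remaining' := remaining.filter (fun kv => !(PySem.Set.contains placed' kv.1))
      sSearchLoopB fuel placed' remaining' (result ++ [(level', current)]) level'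
        (elements + PySem.Set.len current) dim
    else result

def s_search_alt (u_section : List (Int × List Int)) (dim : Int) : List (Int × List Int) :=
  let current : PySem.Set Int := PySem.Set.ofList
    ((u_section.filter (fun kv => kv.2.isEmpty)).map (·.1))
  let remaining := u_section.filter (fun kv => !(PySem.Set.contains current kv.1))
  sSearchLoopB (u_section.length + 1) current remaining [((0 : Int), current)]
    0 (PySem.Set.len current) dim

-- ===== PRECONDITION & SPEC =====
def Spec_s_search (u_section : List (Int × List Int)) (dim : Int) (out : List (Int × List Int)) : Prop := out = s_search_alt u_section dim
instance (u_section : List (Int × List Int)) (dim : Int) (out : List (Int × List Int)) : Decidable (Spec_s_search u_section dim out) := by unfold Spec_s_search; infer_instance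

-- ===== CLAIM (what is proved, stated in full; the proofs are below) =====
def Claim_equal_s_search : Prop := ∀ (u_section : List (Int × List Int)) (dim : Int), Dom_s_search u_section dim → Spec_s_search u_section dim (s_search u_section dim)

-- ===== LEMMAS AND PROOFS =====

theorem foldl_add_if_eq_update (items : List (Int × List Int)) (p : Int × List Int → Bool)
    (acc : PySem.Set Int) :
    items.foldl (fun acc kv => if p kv then PySem.Set.add acc kv.1 else acc) acc
      = PySem.Set.update acc ((items.filter p).map (·.1)) := by
  rw [PySem.Set.update_map_eq_foldl_add, ← List.foldl_filter]

theorem filter_discard (q : Int → Bool) (s : PySem.Set Int) (x : Int) :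
    List.filter q (PySem.Set.discard s x) = PySem.Set.discard (List.filter q s) x := by
  simp only [PySem.Set.discard, List.filter_filter]
  exact List.filter_congr (fun a _ => Bool.and_comm _ _)

theorem filter_ofList (q : Int → Bool) (xs : List Int) :
    (PySem.Set.ofList xs).filter q = PySem.Set.ofList (xs.filter q) := by
  induction xs with
  | nil => rfl
  | cons x xs ih =>
    rw [PySem.Set.ofList_cons, List.filter_cons, List.filter_cons]
    by_cases hq : q x
    · simp only [hq, if_pos]
      rw [PySem.Set.ofList_cons, filter_discard, ih]
    · simp only [hq, Bool.false_eq_true, if_false]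
      rw [filter_discard, ih]
      apply List.filter_eq_self.2
      intro a ha
      have hqa : q a = true :=
        (List.mem_filter.1 ((PySem.Set.mem_ofList _ _).1 ha)).2
      simp only [Bool.not_eq_eq_eq_not, Bool.not_true, beq_eq_false_iff_ne]
      intro h; subst h; exact hq hqa

theorem loop_eq (items : List (Int × List Int)) (fuel : Nat) :
    ∀ (s su : PySem.Dict Int (List Int)) (step elements dim : Int)
    (placed : PySem.Set Int) (remaining result : List (Int × List Int)),
    (∀ x, x ∈ s.getD step [] ↔ x ∈ placed) →
    su.items = result →
    (∀ kv ∈ su.items, kv.1 ≤ step) →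
    remaining = items.filter (fun kv => !(PySem.Set.contains placed kv.1)) →
    (∀ x ∈ placed, ∃ kv ∈ items, kv.1 = x ∧
        PySem.Set.issubset (PySem.Set.ofList kv.2) placed = true) →
    (sSearchLoopA items fuel s su step elements dim).items
      = sSearchLoopB fuel placed remaining result step elements dim := by
  induction fuel with
  | zero => intro s su step elements dim placed remaining result _ hsu _ _ _; exact hsu
  | succ fuel ih =>
    intro s su step elements dim placed remaining result hmem hsu hkeys hrem hfound
    rw [sSearchLoopA, sSearchLoopB]
    by_cases hlt : elements < dim
    · simp only [hlt, if_pos]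
      -- names for the pieces
      set cum := s.getD step [] with hcum
      -- contains over cum and placed agree
      have hcont : PySem.Set.contains cum = PySem.Set.contains placed := by
        funext x
        by_cases hx : x ∈ placed
        · rw [(PySem.Set.contains_iff _ _).2 hx, (PySem.Set.contains_iff _ _).2 ((hmem x).2 hx)]
        · have h1 : PySem.Set.contains cum x = false := by
            cases h : PySem.Set.contains cum x
            · rfl
            · exact absurd ((hmem x).1 ((PySem.Set.contains_iff _ _).1 h)) hx
          have h2 : PySem.Set.contains placed x = false := by
            cases h : PySem.Set.contains placed x
            · rfl
            · exact absurd ((PySem.Set.contains_iff _ _).1 h) hx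
          rw [h1, h2]
      have hpred : (fun kv : Int × List Int => PySem.Set.issubset (PySem.Set.ofList kv.2) cum)
          = (fun kv => PySem.Set.issubset (PySem.Set.ofList kv.2) placed) := by
        funext kv
        simp only [PySem.Set.issubset, hcont]
      -- A's recomputed set
      have hsi : (items.foldl (fun acc kv =>
            if PySem.Set.issubset (PySem.Set.ofList kv.2) cum then PySem.Set.add acc kv.1 else acc)
            PySem.Set.empty)
          = PySem.Set.ofList ((items.filter (fun kv =>
              PySem.Set.issubset (PySem.Set.ofList kv.2) placed)).map (·.1)) := by
        rw [foldl_add_if_eq_update, hpred]; rfl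
      -- the predicate and the two level sets
      set pB : Int × List Int → Bool :=
        (fun kv => PySem.Set.issubset (PySem.Set.ofList kv.2) placed) with hpB
      set SI : PySem.Set Int := PySem.Set.ofList ((items.filter pB).map (·.1)) with hSI
      set cur : PySem.Set Int := PySem.Set.ofList
        (((items.filter (fun kv => !(PySem.Set.contains placed kv.1))).filter pB).map (·.1)) with hcur
      have hdiff : PySem.Set.diff SI cum = cur := by
        show List.filter (fun x => !(PySem.Set.contains cum x)) SI = cur
        rw [hcont, hSI, filter_ofList, List.filter_map, List.filter_filter, hcur]
        congr 1
        rw [List.filter_filter]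
        apply congrArg
        exact List.filter_congr (fun a _ => Bool.and_comm _ _)
      have hnotc : su.contains (step + 1) = false := by
        cases h : su.contains (step + 1)
        · rfl
        · exfalso
          have hk := (PySem.Dict.contains_iff_mem_keys _ _).1 h
          have : ∃ kv ∈ su.items, kv.1 = step + 1 := by
            simpa [PySem.Dict.keys, List.mem_map] using hk
          obtain ⟨kv, hkv, he⟩ := this
          have := hkeys kv hkv; omega
      -- memberships
      have hmemSI : ∀ x, x ∈ SI ↔ ∃ kv, kv ∈ items ∧ kv.1 = x ∧ pB kv = true := by
        intro x
        rw [hSI, PySem.Set.mem_ofList]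
        constructor
        · intro hx
          obtain ⟨kv, hkv, he⟩ := List.mem_map.1 hx
          exact ⟨kv, (List.mem_filter.1 hkv).1, he, (List.mem_filter.1 hkv).2⟩
        · rintro ⟨kv, h1, h2, h3⟩
          exact List.mem_map.2 ⟨kv, List.mem_filter.2 ⟨h1, h3⟩, h2⟩
      have hmemcur : ∀ x, x ∈ cur ↔ ∃ kv, kv ∈ items ∧ kv.1 = x ∧
          PySem.Set.contains placed kv.1 = false ∧ pB kv = true := by
        intro x
        rw [hcur, PySem.Set.mem_ofList]
        constructor
        · intro hx
          obtain ⟨kv, hkv, he⟩ := List.mem_map.1 hx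
          have h1 := List.mem_filter.1 hkv
          have h2 := List.mem_filter.1 h1.1
          refine ⟨kv, h2.1, he, ?_, h1.2⟩
          cases h : PySem.Set.contains placed kv.1
          · rfl
          · rw [h] at h2; exact absurd h2.2 (by simp)
        · rintro ⟨kv, h1, h2, h3, h4⟩
          exact List.mem_map.2 ⟨kv, List.mem_filter.2 ⟨List.mem_filter.2 ⟨h1, by rw [h3]; rfl⟩, h4⟩, h2⟩
      have hSIiff : ∀ x, x ∈ SI ↔ x ∈ PySem.Set.update placed cur := by
        intro x
        rw [PySem.Set.mem_update]
        constructor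
        · intro hx
          obtain ⟨kv, h1, h2, h3⟩ := (hmemSI x).1 hx
          by_cases hp : x ∈ placed
          · exact Or.inl hp
          · refine Or.inr ((hmemcur x).2 ⟨kv, h1, h2, ?_, h3⟩)
            cases h : PySem.Set.contains placed kv.1
            · rfl
            · exact absurd ((PySem.Set.contains_iff _ _).1 h) (h2 ▸ hp)
        · rintro (hp | hc)
          · obtain ⟨kv, h1, h2, h3⟩ := hfound x hp
            refine (hmemSI x).2 ⟨kv, h1, h2, ?_⟩
            rw [hpB]; exact h3
          · obtain ⟨kv, h1, h2, _, h4⟩ := (hmemcur x).1 hc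
            exact (hmemSI x).2 ⟨kv, h1, h2, h4⟩
      have hsub : ∀ x ∈ placed, x ∈ PySem.Set.update placed cur := by
        intro x hx; exact (PySem.Set.mem_update _ _ _).2 (Or.inl hx)
      -- now reduce both recursive calls to an application of ih
      subst hrem hsu
      simp only [PySem.Dict.getD_insert_self, hsi]
      rw [show step + 1 - 1 = step from by omega]
      rw [PySem.Dict.getD_insert_of_ne _ _ _ (show step ≠ step + 1 by omega), ← hcum, ← hcur, hdiff]
      apply ih
      · intro x
        rw [PySem.Dict.getD_insert_self]
        exact hSIiff x
      · exact PySem.Dict.items_insert_of_not_contains _ _ hnotc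
      · intro kv hkv
        rw [PySem.Dict.items_insert_of_not_contains _ _ hnotc] at hkv
        rcases List.mem_append.1 hkv with h | h
        · have := hkeys kv h; omega
        · simp only [List.mem_singleton] at h; rw [h]
      · rw [List.filter_filter]
        apply List.filter_congr
        intro kv _
        by_cases hp' : kv.1 ∈ PySem.Set.update placed cur
        · rw [(PySem.Set.contains_iff _ _).2 hp']
          simp
        · have h1 : PySem.Set.contains (PySem.Set.update placed cur) kv.1 = false := by
            cases h : PySem.Set.contains (PySem.Set.update placed cur) kv.1
            · rfl
            · exact absurd ((PySem.Set.contains_iff _ _).1 h) hp'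
          have h2 : PySem.Set.contains placed kv.1 = false := by
            cases h : PySem.Set.contains placed kv.1
            · rfl
            · exact absurd (hsub _ ((PySem.Set.contains_iff _ _).1 h)) hp'
          rw [h1, h2]; rfl
      · intro x hx
        rcases (PySem.Set.mem_update _ _ _).1 hx with hp | hc
        · obtain ⟨kv, h1, h2, h3⟩ := hfound x hp
          refine ⟨kv, h1, h2, ?_⟩
          rw [PySem.Set.issubset_iff] at h3 ⊢
          exact fun y hy => hsub y (h3 y hy)
        · obtain ⟨kv, h1, h2, _, h4⟩ := (hmemcur x).1 hc
          refine ⟨kv, h1, h2, ?_⟩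
          rw [hpB] at h4
          rw [PySem.Set.issubset_iff] at h4 ⊢
          exact fun y hy => hsub y (h4 y hy)
    · simp only [hlt, if_false]; exact hsu

theorem s_search_eq_alt (u_section : List (Int × List Int)) (dim : Int) :
    s_search u_section dim = s_search_alt u_section dim := by
  simp only [s_search, s_search_alt]
  have hs0 : u_section.foldl
      (fun acc kv => if kv.2.isEmpty then PySem.Set.add acc kv.1 else acc) PySem.Set.empty
      = PySem.Set.ofList ((u_section.filter (fun kv => kv.2.isEmpty)).map (·.1)) := by
    rw [foldl_add_if_eq_update]; rfl
  rw [hs0]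
  set cur0 : PySem.Set Int :=
    PySem.Set.ofList ((u_section.filter (fun kv => kv.2.isEmpty)).map (·.1)) with hcur0
  have hd : PySem.Dict.ofList [((0 : Int), cur0)] = PySem.Dict.empty.insert 0 cur0 := rfl
  rw [hd]
  apply loop_eq
  · intro x
    rw [PySem.Dict.getD_insert_self]
  · rfl
  · intro kv hkv
    have : (PySem.Dict.empty.insert (0 : Int) cur0).items = [((0 : Int), cur0)] := rfl
    rw [this] at hkv
    simp only [List.mem_singleton] at hkv
    rw [hkv]
  · rfl
  · intro x hx
    obtain ⟨kv, hkv, he⟩ := List.mem_map.1 ((PySem.Set.mem_ofList _ _).1 hx)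
    refine ⟨kv, (List.mem_filter.1 hkv).1, he, ?_⟩
    have hemp : kv.2 = [] := List.isEmpty_iff.1 (List.mem_filter.1 hkv).2
    rw [hemp]
    rfl

-- ===== VERDICT (by name: the statement is the Claim_ definition above) =====
theorem s_search_spec : Claim_equal_s_search := by
  intro u_section dim _
  unfold Spec_s_search
  exact s_search_eq_alt u_section dim
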